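-- pv_equiv track=rewrite | github.com/QnAnn-e/Proto-Metabolic-Reaction-Network-Simulator-ProMetRNs- | data_preprocessing.py | reaction_dict
-- ===== SOURCE A (Python) =====
-- def reaction_dict(num_rxn):
--     """ input: num_rxn= reactant or product list
--         output: dictionary with the reaction number and the corresponding reactants and products"""
--     num_dict = {}
--     num_index = 1
--     current_reactants = []
--
--     # Iterate through list1 to build the reactants dictionary
--     for item in num_rxn:
--         if item == '*':
--             # End of a reaction, add to dictionary and reset reactants
--             num_dict[num_index] = current_reactants
--             num_index += 1
--             current_reactants = []
--         else:
--             # Add reactant to the current list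
--             current_reactants.append(item)
--
--     # Add the last reaction
--     if current_reactants:
--         num_dict[num_index] = current_reactants
--     return num_dict
-- ===== SOURCE B (Python) =====
-- def reaction_dict(num_rxn):
--     """Delimiter-position approach: locate every '*' index first, then cut the
--     reaction segments out of num_rxn by slicing between consecutive boundaries."""
--     n = len(num_rxn)
--     stars = [i for i, x in enumerate(num_rxn) if x == '*']
--     bounds = [-1] + stars + [n]
--     return {k: num_rxn[a + 1:b]
--             for k, (a, b) in enumerate(zip(bounds, bounds[1:]), 1)
--             if b < n or a + 1 < b}
-- ===== Notes on version B (the rewrite author's own statement) =====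
-- stated objective: alternative
-- what changed: Instead of A's streaming pass with a pending-segment accumulator and counter, B first computes the positions of all '*' delimiters, forms the boundary list [-1]+stars+[n], and cuts each reaction out of the list by random-access slicing between consecutive boundaries, keeping a slice unless it is the empty trailing one.
import Mathlib
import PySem

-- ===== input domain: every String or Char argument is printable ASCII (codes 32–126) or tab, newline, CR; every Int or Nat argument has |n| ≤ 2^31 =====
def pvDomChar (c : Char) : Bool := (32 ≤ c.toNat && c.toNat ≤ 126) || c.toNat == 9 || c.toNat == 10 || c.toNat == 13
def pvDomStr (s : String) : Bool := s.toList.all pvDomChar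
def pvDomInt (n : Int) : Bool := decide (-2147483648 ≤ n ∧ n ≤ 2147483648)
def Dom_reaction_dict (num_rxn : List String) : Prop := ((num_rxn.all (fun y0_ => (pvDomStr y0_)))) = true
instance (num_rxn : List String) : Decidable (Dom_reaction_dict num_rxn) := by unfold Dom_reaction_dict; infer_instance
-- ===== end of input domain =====

-- B re-implements A by first locating every '*' position, then cutting the segments out of
-- the list by slicing between consecutive delimiter positions — random-access slicing on
-- precomputed boundaries instead of A's streaming accumulator loop (objective: alternative).

-- ===== PORT A =====
-- A's loop body, named so the proof can speak about it
def stepA (st : PySem.Dict Int (List String) × Int × List String) (item : String) :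
    PySem.Dict Int (List String) × Int × List String :=
  if item == "*" then (st.1.insert st.2.1 st.2.2, st.2.1 + 1, [])
  else (st.1, st.2.1, st.2.2 ++ [item])

def reaction_dict (num_rxn : List String) : List (Int × List String) :=
  let s := num_rxn.foldl stepA (PySem.Dict.empty, 1, [])
  -- "if current_reactants: num_dict[num_index] = current_reactants"; dict returned as its items
  (if s.2.2 ≠ [] then (s.1.insert s.2.1 s.2.2) else s.1).items

-- ===== PORT B =====
-- B's dict-comprehension body, named so the proof can speak about it
def stepB (num_rxn : List String) (n : Int) (d : PySem.Dict Int (List String))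
    (kp : Int × Int × Int) : PySem.Dict Int (List String) :=
  if kp.2.2 < n ∨ kp.2.1 + 1 < kp.2.2 then
    d.insert kp.1 (PySem.List.slice num_rxn (some (kp.2.1 + 1)) (some kp.2.2))
  else d

def reaction_dict_alt (num_rxn : List String) : List (Int × List String) :=
  let n : Int := PySem.List.len num_rxn
  -- stars = [i for i, x in enumerate(num_rxn) if x == '*']
  let stars : List Int :=
    ((PySem.List.enumerate num_rxn 0).filter (fun p => p.2 == "*")).map (fun p => p.1)
  -- bounds = [-1] + stars + [n]
  let bounds : List Int := [-1] ++ stars ++ [n]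
  -- {k: num_rxn[a+1:b] for k, (a, b) in enumerate(zip(bounds, bounds[1:]), 1) if b < n or a+1 < b}
  ((PySem.List.enumerate (bounds.zip (PySem.List.slice bounds (some 1) none)) 1).foldl
    (stepB num_rxn n) PySem.Dict.empty).items

-- ===== PRECONDITION & SPEC =====
def Spec_reaction_dict (num_rxn : List String) (out : List (Int × List String)) : Prop := out = reaction_dict_alt num_rxn
instance (num_rxn : List String) (out : List (Int × List String)) : Decidable (Spec_reaction_dict num_rxn out) := by unfold Spec_reaction_dict; infer_instance

-- ===== CLAIM (what is proved, stated in full; the proofs are below) =====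
def Claim_equal_reaction_dict : Prop := ∀ (num_rxn : List String), Dom_reaction_dict num_rxn → Spec_reaction_dict num_rxn (reaction_dict num_rxn)

-- ===== LEMMAS AND PROOFS =====

-- the list of segments delimited by '*', kept empty, proof-side recursive form
def splitRec : List String → List (List String)
  | [] => [[]]
  | head :: rest =>
    let tail := splitRec rest
    if head == "*" then [] :: tail
    else (head :: tail.headD []) :: tail.tail

theorem splitRec_ne_nil (xs : List String) : splitRec xs ≠ [] := by
  cases xs with
  | nil => simp [splitRec]
  | cons h t => simp only [splitRec]; split <;> simp

-- glue cur segs: prepend cur to the first segment (A's pending accumulator merged in)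
def glue (cur : List String) : List (List String) → List (List String)
  | [] => [cur]
  | s :: ss => (cur ++ s) :: ss

-- drop a final empty segment (A keeps the trailing segment only when non-empty)
def dropE (segs : List (List String)) : List (List String) :=
  if segs.getLast? = some [] then segs.dropLast else segs

-- number segments consecutively from i
def numberFrom (i : Int) : List (List String) → List (Int × List String)
  | [] => []
  | s :: ss => (i, s) :: numberFrom (i + 1) ss

theorem dropE_cons (cur : List String) (t : List (List String)) (ht : t ≠ []) :
    dropE (cur :: t) = cur :: dropE t := by
  cases t with
  | nil => exact absurd rfl ht
  | cons s ss =>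
    unfold dropE
    rw [List.getLast?_cons_cons, List.dropLast_cons₂]
    split <;> rfl

theorem glue_glue (cur x : List String) (t : List (List String)) (ht : t ≠ []) :
    glue cur (glue x t) = glue (cur ++ x) t := by
  cases t with
  | nil => exact absurd rfl ht
  | cons s ss => simp [glue]

theorem glue_nil (t : List (List String)) (ht : t ≠ []) : glue [] t = t := by
  cases t with
  | nil => exact absurd rfl ht
  | cons s ss => simp [glue]

-- A's loop invariant: the fold from state (d, n, cur) with all keys of d below n
theorem main_lemma (xs : List String) :
    ∀ (d : PySem.Dict Int (List String)) (n : Int) (cur : List String),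
    (∀ k ∈ d.keys, k < n) →
    (let s := xs.foldl stepA (d, n, cur)
     (if s.2.2 ≠ [] then (s.1.insert s.2.1 s.2.2) else s.1).items)
      = d.items ++ numberFrom n (dropE (glue cur (splitRec xs))) := by
  induction xs with
  | nil =>
    intro d n cur hk
    have hnc : d.contains n = false := by
      rw [PySem.Dict.contains_eq_decide_mem_keys]
      simp only [decide_eq_false_iff_not]
      exact fun hm => lt_irrefl n (hk n hm)
    simp only [List.foldl_nil, splitRec, glue, List.append_nil, dropE]
    cases cur with
    | nil => simp [numberFrom]
    | cons c cs =>
      simp only [List.getLast?_singleton, Option.some.injEq, reduceCtorEq, if_false,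
        ne_eq, not_false_eq_true, if_true, numberFrom,
        PySem.Dict.items_insert_of_not_contains _ _ hnc]
  | cons x rest ih =>
    intro d n cur hk
    simp only [List.foldl_cons]
    by_cases hx : x = "*"
    · have hstep : stepA (d, n, cur) x = (d.insert n cur, n + 1, []) := by
        simp [stepA, hx]
      rw [hstep, ih (d.insert n cur) (n + 1) []
        (by intro k hkm
            rcases (PySem.Dict.mem_keys_insert _ _ _ _).1 hkm with h | h
            · omega
            · have := hk k h; omega)]
      have hnc : d.contains n = false := by
        rw [PySem.Dict.contains_eq_decide_mem_keys]
        simp only [decide_eq_false_iff_not]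
        exact fun hm => lt_irrefl n (hk n hm)
      rw [PySem.Dict.items_insert_of_not_contains _ _ hnc]
      have hsp : splitRec (x :: rest) = [] :: splitRec rest := by
        simp [splitRec, hx]
      rw [hsp]
      have ht := splitRec_ne_nil rest
      rw [glue_nil _ ht]
      have : glue cur ([] :: splitRec rest) = cur :: splitRec rest := by
        simp [glue]
      rw [this, dropE_cons _ _ ht]
      simp [numberFrom]
    · have hstep : stepA (d, n, cur) x = (d, n, cur ++ [x]) := by
        simp [stepA, hx]
      rw [hstep, ih d n (cur ++ [x]) hk]
      have ht := splitRec_ne_nil rest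
      have hsp : splitRec (x :: rest) = glue [x] (splitRec rest) := by
        cases hs : splitRec rest with
        | nil => exact absurd hs ht
        | cons s ss => simp [splitRec, hx, hs, glue]
      rw [hsp, glue_glue _ _ _ ht]

-- ---------- B side ----------

-- the '*' positions, proof-side recursive form (relative indices)
def starsL : List String → List Int
  | [] => []
  | h :: t => if h = "*" then 0 :: (starsL t).map (· + 1) else (starsL t).map (· + 1)

theorem starsL_nonneg (xs : List String) : ∀ i ∈ starsL xs, 0 ≤ i := by
  induction xs with
  | nil => simp [starsL]
  | cons h t ih =>
    intro i hi
    simp only [starsL] at hi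
    split at hi
    · rcases List.mem_cons.1 hi with rfl | hi
      · omega
      · obtain ⟨j, hj, rfl⟩ := List.mem_map.1 hi; have := ih j hj; omega
    · obtain ⟨j, hj, rfl⟩ := List.mem_map.1 hi; have := ih j hj; omega

theorem starsL_lt (xs : List String) : ∀ i ∈ starsL xs, i < (xs.length : Int) := by
  induction xs with
  | nil => simp [starsL]
  | cons h t ih =>
    intro i hi
    simp only [starsL] at hi
    split at hi
    · rcases List.mem_cons.1 hi with rfl | hi
      · simp
      · obtain ⟨j, hj, rfl⟩ := List.mem_map.1 hi; have := ih j hj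
        simp only [List.length_cons]; push_cast; omega
    · obtain ⟨j, hj, rfl⟩ := List.mem_map.1 hi; have := ih j hj
      simp only [List.length_cons]; push_cast; omega

-- the port's list comprehension computes starsL
theorem stars_aux (xs : List String) :
    ∀ s : Int, (((PySem.List.enumerate xs s).filter (fun p => p.2 == "*")).map (fun p => p.1))
      = (starsL xs).map (· + s) := by
  induction xs with
  | nil => intro s; simp [PySem.List.enumerate_nil, starsL]
  | cons h t ih =>
    intro s
    rw [PySem.List.enumerate_cons]
    by_cases hh : h = "*"
    · simp only [starsL, hh, List.filter_cons, beq_self_eq_true, if_true,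
        List.map_cons, ih (s + 1), List.map_map]
      rw [List.cons.injEq]
      refine ⟨by omega, ?_⟩
      congr 1; funext i; simp; omega
    · simp only [starsL, if_neg hh, List.filter_cons]
      rw [if_neg (by simpa using hh)]
      rw [ih (s + 1), List.map_map]
      congr 1; funext i; simp; omega

-- consecutive pairs of a boundary list
def pairList (a : Int) : List Int → List (Int × Int)
  | [] => []
  | b :: r => (a, b) :: pairList b r

theorem zip_tail_eq_pairList (a : Int) (r : List Int) : (a :: r).zip r = pairList a r := by
  induction r generalizing a with
  | nil => rfl
  | cons b r ih => simp only [List.zip_cons_cons, pairList, ih b]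

theorem pairList_ne_nil (a : Int) (l : List Int) (x : Int) : pairList a (l ++ [x]) ≠ [] := by
  cases l <;> simp [pairList]

theorem pairList_map_succ (l : List Int) :
    ∀ a : Int, pairList (a + 1) (l.map (· + 1)) = (pairList a l).map (fun p => (p.1 + 1, p.2 + 1)) := by
  induction l with
  | nil => intro a; rfl
  | cons b r ih => intro a; simp only [List.map_cons, pairList, ih b, List.map_cons]

theorem pairList_mem_bounds (l : List Int) (hl : ∀ i ∈ l, 0 ≤ i) :
    ∀ a : Int, -1 ≤ a → ∀ p ∈ pairList a l, -1 ≤ p.1 ∧ 0 ≤ p.2 := by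
  induction l with
  | nil => intro a _ p hp; simp [pairList] at hp
  | cons b r ih =>
    intro a ha p hp
    have hb : 0 ≤ b := hl b (by simp)
    rcases List.mem_cons.1 hp with rfl | hp
    · exact ⟨ha, hb⟩
    · exact ih (fun i hi => hl i (by simp [hi])) b (by omega) p hp

-- index-shift for slices with one element prepended
theorem slice_shift {α : Type} (x : α) (t : List α) (i j : Int) (hi : 0 ≤ i) (hj : 0 ≤ j) :
    PySem.List.slice (x :: t) (some (i + 1)) (some (j + 1)) = PySem.List.slice t (some i) (some j) := by
  rw [PySem.List.slice_toNat _ (by omega) (by omega), PySem.List.slice_toNat _ hi hj]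
  have h1 : (i + 1).toNat = i.toNat + 1 := by omega
  have h2 : (j + 1).toNat = j.toNat + 1 := by omega
  rw [h1, h2]
  simp [List.drop_succ_cons]

theorem slice_zero_succ {α : Type} (x : α) (t : List α) (b : Int) (hb : 0 ≤ b) :
    PySem.List.slice (x :: t) (some 0) (some (b + 1)) = x :: PySem.List.slice t (some 0) (some b) := by
  rw [PySem.List.slice_toNat _ le_rfl (by omega), PySem.List.slice_toNat _ le_rfl hb]
  have h2 : (b + 1).toNat = b.toNat + 1 := by omega
  simp [h2]

-- a tail slice up to len is a drop
theorem slice_tail_drop {α : Type} (xs : List α) (m : Int) (hm : 0 ≤ m) :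
    PySem.List.slice xs (some m) (some (xs.length : Int)) = xs.drop m.toNat := by
  rw [PySem.List.slice_toNat _ hm (by positivity)]
  exact List.take_of_length_le (by simp)

-- the crux: slicing between consecutive boundaries yields exactly splitRec's segments
theorem seg_split (xs : List String) :
    (pairList (-1) (starsL xs ++ [(xs.length : Int)])).map
      (fun p => PySem.List.slice xs (some (p.1 + 1)) (some p.2)) = splitRec xs := by
  induction xs with
  | nil => simp [starsL, pairList, splitRec, PySem.List.slice_toNat]
  | cons x t ih =>
    have hmem : ∀ p ∈ pairList (-1) (starsL t ++ [(t.length : Int)]), -1 ≤ p.1 ∧ 0 ≤ p.2 := by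
      refine pairList_mem_bounds _ ?_ (-1) le_rfl
      intro i hi
      rcases List.mem_append.1 hi with h | h
      · exact starsL_nonneg t i h
      · simp at h; omega
    have hb : (starsL t).map (· + 1) ++ [((x :: t).length : Int)]
        = (starsL t ++ [(t.length : Int)]).map (· + 1) := by simp
    have hcomp : ∀ p ∈ pairList (-1) (starsL t ++ [(t.length : Int)]),
        ((fun p : Int × Int => PySem.List.slice (x :: t) (some (p.1 + 1)) (some p.2)) ∘
          (fun p : Int × Int => (p.1 + 1, p.2 + 1))) p
        = PySem.List.slice t (some (p.1 + 1)) (some p.2) := by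
      intro p hp
      obtain ⟨h1, h2⟩ := hmem p hp
      show PySem.List.slice (x :: t) (some (p.1 + 1 + 1)) (some (p.2 + 1)) = _
      exact slice_shift x t (p.1 + 1) p.2 (by omega) h2
    by_cases hx : x = "*"
    · have hst : starsL (x :: t) = 0 :: (starsL t).map (· + 1) := by simp [starsL, hx]
      rw [hst, List.cons_append, hb]
      have hshift : pairList 0 ((starsL t ++ [(t.length : Int)]).map (· + 1))
          = (pairList (-1) (starsL t ++ [(t.length : Int)])).map (fun p => (p.1 + 1, p.2 + 1)) := by
        have h := pairList_map_succ (starsL t ++ [(t.length : Int)]) (-1)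
        rw [show (-1 : Int) + 1 = 0 from by ring] at h
        exact h
      show ((-1, (0 : Int)) :: pairList 0 ((starsL t ++ [(t.length : Int)]).map (· + 1))).map
        (fun p => PySem.List.slice (x :: t) (some (p.1 + 1)) (some p.2)) = splitRec (x :: t)
      rw [hshift, List.map_cons, List.map_map, List.map_congr_left hcomp, ih]
      have hhead : PySem.List.slice (x :: t) none (some (0 : Int)) = [] := by
        rw [PySem.List.slice_to _ le_rfl]; simp
      subst hx
      simp [splitRec, hhead]
    · have hst : starsL (x :: t) = (starsL t).map (· + 1) := by simp [starsL, hx]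
      rw [hst, hb]
      obtain ⟨b0, L', hL⟩ : ∃ b0 L', starsL t ++ [(t.length : Int)] = b0 :: L' := by
        cases h : starsL t ++ [(t.length : Int)] with
        | nil => exact absurd h (by simp)
        | cons b0 L' => exact ⟨b0, L', rfl⟩
      have hb0 : 0 ≤ b0 := by
        have : b0 ∈ starsL t ++ [(t.length : Int)] := by rw [hL]; simp
        rcases List.mem_append.1 this with h | h
        · exact starsL_nonneg t b0 h
        · simp at h; omega
      rw [hL, List.map_cons]
      show ((-1, b0 + 1) :: pairList (b0 + 1) (L'.map (· + 1))).map
        (fun p => PySem.List.slice (x :: t) (some (p.1 + 1)) (some p.2)) = splitRec (x :: t)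
      rw [pairList_map_succ L' b0, List.map_cons, List.map_map]
      have hcomp' : ∀ p ∈ pairList b0 L',
          ((fun p : Int × Int => PySem.List.slice (x :: t) (some (p.1 + 1)) (some p.2)) ∘
            (fun p : Int × Int => (p.1 + 1, p.2 + 1))) p
          = PySem.List.slice t (some (p.1 + 1)) (some p.2) := by
        intro p hp
        refine hcomp p ?_
        rw [hL]
        exact List.mem_cons_of_mem _ hp
      rw [List.map_congr_left hcomp']
      have hhead : PySem.List.slice (x :: t) (some ((-1 : Int) + 1)) (some (b0 + 1))
          = x :: PySem.List.slice t (some 0) (some b0) := by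
        rw [show (-1 : Int) + 1 = 0 by ring]
        exact slice_zero_succ x t b0 hb0
      have iht : PySem.List.slice t (some ((-1 : Int) + 1)) (some b0) ::
          (pairList b0 L').map (fun p => PySem.List.slice t (some (p.1 + 1)) (some p.2))
          = splitRec t := by
        rw [← ih, hL, pairList, List.map_cons]
      simp only [splitRec]
      rw [if_neg (by simpa using hx), ← iht]
      simp only [List.headD_cons, List.tail_cons]
      rw [List.cons.injEq]
      refine ⟨?_, rfl⟩
      rw [hhead]
      norm_num

-- B's fold invariant: the dict built over the enumerated boundary pairs
theorem B_loop (xs : List String) (st : List Int)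
    (hst : ∀ i ∈ st, 0 ≤ i ∧ i < (xs.length : Int)) :
    ∀ (a k : Int) (d : PySem.Dict Int (List String)), -1 ≤ a →
    (∀ j ∈ d.keys, j < k) →
    ((PySem.List.enumerate (pairList a (st ++ [(xs.length : Int)])) k).foldl
      (stepB xs (xs.length : Int)) d).items
      = d.items ++ numberFrom k (dropE ((pairList a (st ++ [(xs.length : Int)])).map
          (fun p => PySem.List.slice xs (some (p.1 + 1)) (some p.2)))) := by
  induction st with
  | nil =>
    intro a k d ha hk
    have hnc : d.contains k = false := by
      rw [PySem.Dict.contains_eq_decide_mem_keys]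
      simp only [decide_eq_false_iff_not]
      exact fun hm => lt_irrefl k (hk k hm)
    simp only [List.nil_append, pairList, PySem.List.enumerate_cons, PySem.List.enumerate_nil,
      List.foldl_cons, List.foldl_nil, List.map_cons, List.map_nil]
    have hslice : PySem.List.slice xs (some (a + 1)) (some (xs.length : Int))
        = xs.drop (a + 1).toNat := slice_tail_drop xs (a + 1) (by omega)
    by_cases hc : a + 1 < (xs.length : Int)
    · have hne : xs.drop (a + 1).toNat ≠ [] := by
        intro h
        have := List.drop_eq_nil_iff.1 h
        omega
      rw [show stepB xs (xs.length : Int) d (k, a, (xs.length : Int))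
            = d.insert k (PySem.List.slice xs (some (a + 1)) (some (xs.length : Int))) by
          simp [stepB, hc]]
      rw [PySem.Dict.items_insert_of_not_contains _ _ hnc, hslice]
      unfold dropE
      rw [if_neg (by simp [hne])]
      simp [numberFrom]
    · have heq : xs.drop (a + 1).toNat = [] := List.drop_eq_nil_iff.2 (by omega)
      rw [show stepB xs (xs.length : Int) d (k, a, (xs.length : Int)) = d by
          simp [stepB]; omega]
      rw [hslice, heq]
      unfold dropE
      simp [numberFrom]
  | cons s0 rest ih =>
    intro a k d ha hk
    have hs0 := hst s0 (by simp)
    have hnc : d.contains k = false := by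
      rw [PySem.Dict.contains_eq_decide_mem_keys]
      simp only [decide_eq_false_iff_not]
      exact fun hm => lt_irrefl k (hk k hm)
    simp only [List.cons_append, pairList, PySem.List.enumerate_cons, List.foldl_cons,
      List.map_cons]
    rw [show stepB xs (xs.length : Int) d (k, a, s0)
          = d.insert k (PySem.List.slice xs (some (a + 1)) (some s0)) by
        simp [stepB]; omega]
    rw [ih (fun i hi => hst i (by simp [hi])) s0 (k + 1)
      (d.insert k (PySem.List.slice xs (some (a + 1)) (some s0)))
      (by omega)
      (by intro j hj
          rcases (PySem.Dict.mem_keys_insert _ _ _ _).1 hj with h | h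
          · omega
          · have := hk j h; omega)]
    rw [PySem.Dict.items_insert_of_not_contains _ _ hnc]
    have hne : (pairList s0 (rest ++ [(xs.length : Int)])).map
        (fun p => PySem.List.slice xs (some (p.1 + 1)) (some p.2)) ≠ [] := by
      simp [pairList_ne_nil]
    rw [dropE_cons _ _ hne]
    simp [numberFrom]

-- ===== VERDICT (by name: the statement is the Claim_ definition above) =====
theorem reaction_dict_spec : Claim_equal_reaction_dict := by
  intro num_rxn _
  show reaction_dict num_rxn = reaction_dict_alt num_rxn
  -- A's side
  have hA := main_lemma num_rxn PySem.Dict.empty 1 [] (by simp [PySem.Dict.keys_empty])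
  simp only [reaction_dict]
  rw [hA]
  rw [glue_nil _ (splitRec_ne_nil num_rxn)]
  -- B's side
  simp only [reaction_dict_alt]
  rw [PySem.List.slice_from_one]
  have hstars : (((PySem.List.enumerate num_rxn 0).filter (fun p => p.2 == "*")).map
      (fun p => p.1)) = starsL num_rxn := by
    rw [stars_aux num_rxn 0]
    simp
  rw [hstars]
  have hzip : ((-1 :: (starsL num_rxn ++ [PySem.List.len num_rxn])).zip
      (starsL num_rxn ++ [PySem.List.len num_rxn]))
      = pairList (-1) (starsL num_rxn ++ [PySem.List.len num_rxn]) :=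
    zip_tail_eq_pairList _ _
  simp only [List.cons_append, List.nil_append, List.tail_cons] at hzip ⊢
  rw [hzip]
  rw [PySem.List.len_eq]
  rw [B_loop num_rxn (starsL num_rxn)
    (fun i hi => ⟨starsL_nonneg num_rxn i hi, starsL_lt num_rxn i hi⟩)
    (-1) 1 PySem.Dict.empty le_rfl (by simp [PySem.Dict.keys_empty])]
  rw [seg_split]
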